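-- pv_equiv track=rewrite | github.com/saghal/BESSTIE | Code/utils/data_util.py | __remove_unbalanced
-- ===== SOURCE A (Python) =====
-- def __remove_unbalanced(text: str, open_char: str, close_char: str) -> str:
--     """
--     Remove unbalanced occurrences of the specified characters from the text.
--
--     Args:
--         text (str): The text to process.
--         open_char (str): The opening character (e.g., '[').
--         close_char (str): The closing character (e.g., ']').
--
--     Returns:
--         str: The text with unbalanced characters removed.
--     """
--     indices_to_remove = set()
--     stack = []
--     for i, ch in enumerate(text):
--         if ch == open_char:
--             stack.append(i)
--         elif ch == close_char:
--             if stack: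
--                 stack.pop()
--             else:
--                 indices_to_remove.add(i)
--     indices_to_remove.update(stack)
--     return "".join(ch for i, ch in enumerate(text) if i not in indices_to_remove)
-- ===== SOURCE B (Python) =====
-- def __remove_unbalanced(text: str, open_char: str, close_char: str) -> str:
--     # Two-pass counter method: no index set, no stack, no final filter.
--     # Pass 1 (left-to-right): drop excess closing chars using an open-count.
--     kept = []
--     opens = 0
--     for ch in text:
--         if ch == open_char:
--             opens += 1
--             kept.append(ch)
--         elif ch == close_char:
--             if opens > 0:
--                 opens -= 1
--                 kept.append(ch)
--         else:
--             kept.append(ch)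
--     # Pass 2 (right-to-left): drop unmatched opening chars using a close-count.
--     out = []
--     closes = 0
--     for ch in reversed(kept):
--         if ch == open_char:
--             if closes > 0:
--                 closes -= 1
--                 out.append(ch)
--         elif ch == close_char:
--             closes += 1
--             out.append(ch)
--         else:
--             out.append(ch)
--     out.reverse()
--     return "".join(out)
-- ===== Notes on version B (the rewrite author's own statement) =====
-- stated objective: idiomatic
-- what changed: Replaced A's index-set bookkeeping (enumerate, a stack of indices, a set of indices to remove, then a filtering re-scan) by the classic two-pass counter method: a left-to-right pass with an open-counter drops excess closers, a right-to-left pass with a close-counter drops unmatched openers; no stack, no index set, no final filter.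
import Mathlib
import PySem

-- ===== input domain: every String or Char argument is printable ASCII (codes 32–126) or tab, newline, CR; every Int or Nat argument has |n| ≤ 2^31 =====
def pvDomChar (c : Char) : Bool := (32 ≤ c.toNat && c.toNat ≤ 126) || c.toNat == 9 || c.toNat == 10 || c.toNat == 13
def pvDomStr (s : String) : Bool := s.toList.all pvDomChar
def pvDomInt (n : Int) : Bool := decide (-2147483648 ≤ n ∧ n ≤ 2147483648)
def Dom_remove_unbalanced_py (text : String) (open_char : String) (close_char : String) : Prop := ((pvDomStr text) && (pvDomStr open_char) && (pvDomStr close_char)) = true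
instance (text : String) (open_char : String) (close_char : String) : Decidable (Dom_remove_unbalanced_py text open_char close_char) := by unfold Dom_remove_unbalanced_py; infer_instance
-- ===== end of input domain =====

-- B replaces A's index-set bookkeeping by the classic two-pass counter method (same O(n) cost, no stack/index set/final filter).

-- ===== PORT A =====
-- Python's `ch == open_char` on a 1-char string ch is ported as `open_char.toList = [c]`.
-- enumerate(text), with starting index j threaded for the recursion:
def pvEnumFrom (j : Nat) : List Char → List (Nat × Char)
  | [] => []
  | c :: r => (j, c) :: pvEnumFrom (j + 1) r

-- the for-loop of A: stack of indices (Python append/pop at the end = cons/uncons at the head), set of indices to remove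
def pvA_scan (oL cL : List Char) : List (Nat × Char) → List Nat → PySem.Set Nat → List Nat × PySem.Set Nat
  | [], st, rem => (st, rem)
  | (i, c) :: rest, st, rem =>
    if oL = [c] then pvA_scan oL cL rest (i :: st) rem
    else if cL = [c] then
      match st with
      | [] => pvA_scan oL cL rest [] (PySem.Set.add rem i)
      | _ :: t => pvA_scan oL cL rest t rem
    else pvA_scan oL cL rest st rem

def remove_unbalanced_py (text : String) (open_char : String) (close_char : String) : String :=
  let e := pvEnumFrom 0 text.toList
  let sr := pvA_scan open_char.toList close_char.toList e [] (PySem.Set.ofList [])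
  -- indices_to_remove.update(stack):
  let removed := sr.1.foldl (fun s i => PySem.Set.add s i) sr.2
  -- "".join(ch for i, ch in enumerate(text) if i not in indices_to_remove):
  String.mk (e.filterMap (fun p => if PySem.Set.contains removed p.1 then none else some p.2))

-- ===== PORT B =====
-- pass 1 (left-to-right): drop excess closers, counting pending openers
def pvB_pass1 (oL cL : List Char) : List Char → Nat → List Char
  | [], _ => []
  | c :: rest, n =>
    if oL = [c] then c :: pvB_pass1 oL cL rest (n + 1)
    else if cL = [c] then
      if 0 < n then c :: pvB_pass1 oL cL rest (n - 1) else pvB_pass1 oL cL rest n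
    else c :: pvB_pass1 oL cL rest n

-- pass 2 (right-to-left, fed the reversed list): drop unmatched openers, counting pending closers
def pvB_pass2 (oL cL : List Char) : List Char → Nat → List Char
  | [], _ => []
  | c :: rest, m =>
    if oL = [c] then
      if 0 < m then c :: pvB_pass2 oL cL rest (m - 1) else pvB_pass2 oL cL rest m
    else if cL = [c] then c :: pvB_pass2 oL cL rest (m + 1)
    else c :: pvB_pass2 oL cL rest m

def remove_unbalanced_py_alt (text : String) (open_char : String) (close_char : String) : String :=
  let oL := open_char.toList
  let cL := close_char.toList
  String.mk ((pvB_pass2 oL cL ((pvB_pass1 oL cL text.toList 0).reverse) 0).reverse)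

-- ===== PRECONDITION & SPEC =====
def Spec_remove_unbalanced_py (text : String) (open_char : String) (close_char : String) (out : String) : Prop := out = remove_unbalanced_py_alt text open_char close_char
instance (text : String) (open_char : String) (close_char : String) (out : String) : Decidable (Spec_remove_unbalanced_py text open_char close_char out) := by unfold Spec_remove_unbalanced_py; infer_instance

-- ===== CLAIM (what is proved, stated in full; the proofs are below) =====
def Claim_equal_remove_unbalanced_py : Prop := ∀ (text : String) (open_char : String) (close_char : String), Dom_remove_unbalanced_py text open_char close_char → Spec_remove_unbalanced_py text open_char close_char (remove_unbalanced_py text open_char close_char)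

-- ===== LEMMAS AND PROOFS =====

-- proof-side decomposition of A's scan: the stack part …
def pvStep (oL cL : List Char) (st : List Nat) (p : Nat × Char) : List Nat :=
  if oL = [p.2] then p.1 :: st else if cL = [p.2] then st.tail else st

def pvSt (oL cL : List Char) (E : List (Nat × Char)) (st : List Nat) : List Nat :=
  E.foldl (pvStep oL cL) st

-- … and the removal-set part, which depends on the stack only through its height n
def pvRem (oL cL : List Char) : List (Nat × Char) → Nat → PySem.Set Nat → PySem.Set Nat
  | [], _, rem => rem
  | (i, c) :: R, n, rem =>
    if oL = [c] then pvRem oL cL R (n + 1) rem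
    else if cL = [c] then
      if 0 < n then pvRem oL cL R (n - 1) rem else pvRem oL cL R 0 (PySem.Set.add rem i)
    else pvRem oL cL R n rem

-- prefix validity (no excess closer) of a pair list, from height n
def pvh (oL cL : List Char) : List (Nat × Char) → Nat → Bool
  | [], _ => true
  | (_, c) :: R, n =>
    if oL = [c] then pvh oL cL R (n + 1)
    else if cL = [c] then decide (0 < n) && pvh oL cL R (n - 1)
    else pvh oL cL R n

theorem pvA_scan_split (oL cL : List Char) (E : List (Nat × Char)) (st : List Nat) (rem : PySem.Set Nat) :
    pvA_scan oL cL E st rem = (pvSt oL cL E st, pvRem oL cL E st.length rem) := by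
  induction E generalizing st rem with
  | nil => simp [pvA_scan, pvSt, pvRem]
  | cons p R ih =>
    obtain ⟨i, c⟩ := p
    by_cases ho : oL = [c]
    · subst ho
      simp [pvA_scan, pvSt, pvRem, pvStep, List.foldl_cons, ih]
    · by_cases hc : cL = [c]
      · subst hc
        cases st with
        | nil => simp [pvA_scan, pvSt, pvRem, pvStep, ho, List.foldl_cons, ih]
        | cons s t => simp [pvA_scan, pvSt, pvRem, pvStep, ho, List.foldl_cons, ih]
      · simp [pvA_scan, pvSt, pvRem, pvStep, ho, hc, List.foldl_cons, ih]

theorem pvRem_mono (oL cL : List Char) (E : List (Nat × Char)) (n : Nat) (rem : PySem.Set Nat)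
    (x : Nat) (hx : x ∈ rem) : x ∈ pvRem oL cL E n rem := by
  induction E generalizing n rem with
  | nil => simpa [pvRem] using hx
  | cons p R ih =>
    obtain ⟨i, c⟩ := p
    by_cases ho : oL = [c]
    · subst ho; simpa [pvRem] using ih _ _ hx
    · by_cases hc : cL = [c]
      · subst hc
        by_cases hn : 0 < n
        · simpa [pvRem, ho, hn] using ih _ _ hx
        · have hx' : x ∈ PySem.Set.add rem i := (PySem.Set.mem_add rem i x).mpr (Or.inl hx)
          simpa [pvRem, ho, hn] using ih _ _ hx'
      · simpa [pvRem, ho, hc] using ih _ _ hx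

theorem pvRem_mem (oL cL : List Char) (E : List (Nat × Char)) (n : Nat) (rem : PySem.Set Nat)
    (x : Nat) (hx : x ∈ pvRem oL cL E n rem) : x ∈ rem ∨ x ∈ E.map Prod.fst := by
  induction E generalizing n rem with
  | nil =>
    simp only [pvRem] at hx
    exact Or.inl hx
  | cons p R ih =>
    obtain ⟨i, c⟩ := p
    by_cases ho : oL = [c]
    · subst ho
      rcases ih _ _ (by simpa [pvRem] using hx) with h | h
      · exact Or.inl h
      · exact Or.inr (by simp [h])
    · by_cases hc : cL = [c]
      · subst hc
        by_cases hn : 0 < n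
        · rcases ih _ _ (by simpa [pvRem, ho, hn] using hx) with h | h
          · exact Or.inl h
          · exact Or.inr (by simp [h])
        · rcases ih _ _ (by simpa [pvRem, ho, hn] using hx) with h | h
          · rcases (PySem.Set.mem_add rem i x).mp h with h' | h'
            · exact Or.inl h'
            · exact Or.inr (by simp [h'])
          · exact Or.inr (by simp [h])
      · rcases ih _ _ (by simpa [pvRem, ho, hc] using hx) with h | h
        · exact Or.inl h
        · exact Or.inr (by simp [h])

theorem pvSt_mem (oL cL : List Char) (E : List (Nat × Char)) (st : List Nat)
    (x : Nat) (hx : x ∈ pvSt oL cL E st) : x ∈ st ∨ x ∈ E.map Prod.fst := by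
  induction E generalizing st with
  | nil =>
    simp only [pvSt, List.foldl_nil] at hx
    exact Or.inl hx
  | cons p R ih =>
    obtain ⟨i, c⟩ := p
    rcases ih _ (by simpa [pvSt, List.foldl_cons] using hx) with h | h
    · unfold pvStep at h
      split_ifs at h with ho hc
      · rcases List.mem_cons.mp h with h | h
        · exact Or.inr (by simp [h])
        · exact Or.inl h
      · exact Or.inl (List.mem_of_mem_tail h)
      · exact Or.inl h
    · exact Or.inr (by simp [h])

theorem pvEnumFrom_fst_ge (j : Nat) (l : List Char) (p : Nat × Char)
    (hp : p ∈ pvEnumFrom j l) : j ≤ p.1 := by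
  induction l generalizing j with
  | nil => simp [pvEnumFrom] at hp
  | cons c r ih =>
    rcases List.mem_cons.mp hp with h | h
    · simp [h]
    · exact Nat.le_of_succ_le (ih (j + 1) h)

theorem pvEnumFrom_pairwise (j : Nat) (l : List Char) :
    List.Pairwise (fun p q => p.1 < q.1) (pvEnumFrom j l) := by
  induction l generalizing j with
  | nil => simp [pvEnumFrom]
  | cons c r ih =>
    refine List.pairwise_cons.mpr ⟨fun q hq => ?_, ih (j + 1)⟩
    exact Nat.lt_of_succ_le (pvEnumFrom_fst_ge (j + 1) r q hq)

theorem pvFilterMap_eq_filter_map (l : List (Nat × Char)) (f : Nat × Char → Bool) :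
    l.filterMap (fun p => if f p then none else some p.2)
      = (l.filter (fun p => !f p)).map Prod.snd := by
  induction l with
  | nil => simp
  | cons p R ih =>
    by_cases h : f p
    · simp [h, ih]
    · simp [h, ih]

-- the current index j is never in a removal set built from smaller indices and a strictly later suffix
theorem pv_head_not_mem (oL cL : List Char) (r : List Char) (j n : Nat) (rem : PySem.Set Nat)
    (hrem : ∀ x ∈ rem, x < j) :
    j ∉ pvRem oL cL (pvEnumFrom (j + 1) r) n rem := by
  intro hmem
  rcases pvRem_mem oL cL _ _ _ _ hmem with h' | h'
  · exact absurd (hrem j h') (by omega)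
  · rcases List.mem_map.mp h' with ⟨p, hp, hpj⟩
    have := pvEnumFrom_fst_ge (j + 1) r p hp
    omega

-- pass 1 of B computes exactly the characters A's removal set keeps
theorem pv_pass1_eq (oL cL : List Char) (cs : List Char) (j n : Nat) (rem : PySem.Set Nat)
    (hrem : ∀ x ∈ rem, x < j) :
    ((pvEnumFrom j cs).filter
        (fun p => !decide (p.1 ∈ pvRem oL cL (pvEnumFrom j cs) n rem))).map Prod.snd
      = pvB_pass1 oL cL cs n := by
  induction cs generalizing j n rem with
  | nil => simp [pvEnumFrom, pvB_pass1]
  | cons c r ih =>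
    have hrem' : ∀ x ∈ rem, x < j + 1 := fun x hx => Nat.lt_succ_of_lt (hrem x hx)
    by_cases ho : oL = [c]
    · subst ho
      have hk := pv_head_not_mem [c] cL r j (n + 1) rem hrem
      simpa [pvEnumFrom, pvRem, pvB_pass1, hk] using ih (j + 1) (n + 1) rem hrem'
    · by_cases hc : cL = [c]
      · subst hc
        by_cases hn : 0 < n
        · have hk := pv_head_not_mem oL [c] r j (n - 1) rem hrem
          simpa [pvEnumFrom, pvRem, pvB_pass1, ho, hn, hk] using ih (j + 1) (n - 1) rem hrem'
        · have hj : j ∈ pvRem oL [c] (pvEnumFrom (j + 1) r) 0 (PySem.Set.add rem j) :=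
            pvRem_mono oL [c] _ _ _ j ((PySem.Set.mem_add rem j j).mpr (Or.inr rfl))
          have hn0 : n = 0 := by omega
          subst hn0
          simpa [pvEnumFrom, pvRem, pvB_pass1, ho, hj] using
            ih (j + 1) 0 (PySem.Set.add rem j)
              (fun x hx => by
                rcases (PySem.Set.mem_add rem j x).mp hx with h | h
                · exact Nat.lt_succ_of_lt (hrem x h)
                · omega)
      · have hk := pv_head_not_mem oL cL r j n rem hrem
        simpa [pvEnumFrom, pvRem, pvB_pass1, ho, hc, hk] using ih (j + 1) n rem hrem'

-- the filtered list is prefix-valid from the same height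
theorem pv_filtered_valid (oL cL : List Char) (cs : List Char) (j n : Nat) (rem : PySem.Set Nat)
    (hrem : ∀ x ∈ rem, x < j) :
    pvh oL cL ((pvEnumFrom j cs).filter
        (fun p => !decide (p.1 ∈ pvRem oL cL (pvEnumFrom j cs) n rem))) n = true := by
  induction cs generalizing j n rem with
  | nil => simp [pvEnumFrom, pvh]
  | cons c r ih =>
    have hrem' : ∀ x ∈ rem, x < j + 1 := fun x hx => Nat.lt_succ_of_lt (hrem x hx)
    by_cases ho : oL = [c]
    · subst ho
      have hk := pv_head_not_mem [c] cL r j (n + 1) rem hrem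
      simpa [pvEnumFrom, pvRem, pvh, hk] using ih (j + 1) (n + 1) rem hrem'
    · by_cases hc : cL = [c]
      · subst hc
        by_cases hn : 0 < n
        · have hk := pv_head_not_mem oL [c] r j (n - 1) rem hrem
          simpa [pvEnumFrom, pvRem, pvh, ho, hn, hk] using ih (j + 1) (n - 1) rem hrem'
        · have hj : j ∈ pvRem oL [c] (pvEnumFrom (j + 1) r) 0 (PySem.Set.add rem j) :=
            pvRem_mono oL [c] _ _ _ j ((PySem.Set.mem_add rem j j).mpr (Or.inr rfl))
          have hn0 : n = 0 := by omega
          subst hn0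
          simpa [pvEnumFrom, pvRem, pvh, ho, hj] using
            ih (j + 1) 0 (PySem.Set.add rem j)
              (fun x hx => by
                rcases (PySem.Set.mem_add rem j x).mp hx with h | h
                · exact Nat.lt_succ_of_lt (hrem x h)
                · omega)
      · have hk := pv_head_not_mem oL cL r j n rem hrem
        simpa [pvEnumFrom, pvRem, pvh, ho, hc, hk] using ih (j + 1) n rem hrem'

-- removing the excess closers does not change the stack evolution
theorem pv_transfer (oL cL : List Char) (cs : List Char) (j : Nat) (st : List Nat) (rem : PySem.Set Nat)
    (hrem : ∀ x ∈ rem, x < j) :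
    pvSt oL cL ((pvEnumFrom j cs).filter
        (fun p => !decide (p.1 ∈ pvRem oL cL (pvEnumFrom j cs) st.length rem))) st
      = pvSt oL cL (pvEnumFrom j cs) st := by
  induction cs generalizing j st rem with
  | nil => simp [pvEnumFrom]
  | cons c r ih =>
    have hrem' : ∀ x ∈ rem, x < j + 1 := fun x hx => Nat.lt_succ_of_lt (hrem x hx)
    by_cases ho : oL = [c]
    · subst ho
      have hk := pv_head_not_mem [c] cL r j (st.length + 1) rem hrem
      simpa [pvEnumFrom, pvRem, pvSt, pvStep, List.foldl_cons, hk] using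
        ih (j + 1) (j :: st) rem hrem'
    · by_cases hc : cL = [c]
      · subst hc
        cases st with
        | nil =>
          have hj : j ∈ pvRem oL [c] (pvEnumFrom (j + 1) r) 0 (PySem.Set.add rem j) :=
            pvRem_mono oL [c] _ _ _ j ((PySem.Set.mem_add rem j j).mpr (Or.inr rfl))
          simpa [pvEnumFrom, pvRem, pvSt, pvStep, List.foldl_cons, ho, hj] using
            ih (j + 1) [] (PySem.Set.add rem j)
              (fun x hx => by
                rcases (PySem.Set.mem_add rem j x).mp hx with h | h
                · exact Nat.lt_succ_of_lt (hrem x h)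
                · omega)
        | cons s t =>
          have hk := pv_head_not_mem oL [c] r j t.length rem hrem
          simpa [pvEnumFrom, pvRem, pvSt, pvStep, List.foldl_cons, ho, hk] using
            ih (j + 1) t rem hrem'
      · have hk := pv_head_not_mem oL cL r j st.length rem hrem
        simpa [pvEnumFrom, pvRem, pvSt, pvStep, List.foldl_cons, ho, hc, hk] using
          ih (j + 1) st rem hrem'

-- splitting prefix validity across an append, yielding the height after the prefix
theorem pvh_append_elim (oL cL : List Char) (W Z : List (Nat × Char)) (n : Nat)
    (h : pvh oL cL (W ++ Z) n = true) :
    pvh oL cL W n = true ∧ ∀ st : List Nat, st.length = n → pvh oL cL Z (pvSt oL cL W st).length = true := by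
  induction W generalizing n with
  | nil =>
    refine ⟨rfl, fun st hst => ?_⟩
    simpa [pvSt, hst] using h
  | cons p W' ih =>
    obtain ⟨i, c⟩ := p
    by_cases ho : oL = [c]
    · subst ho
      have h' := ih (n + 1) (by simpa [pvh] using h)
      refine ⟨by simpa [pvh] using h'.1, fun st hst => ?_⟩
      have := h'.2 (i :: st) (by simp [hst])
      simpa [pvSt, List.foldl_cons, pvStep] using this
    · by_cases hc : cL = [c]
      · subst hc
        have h0 : 0 < n ∧ pvh oL [c] (W' ++ Z) (n - 1) = true := by
          simpa [pvh, ho] using h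
        have h' := ih (n - 1) h0.2
        refine ⟨by simp [pvh, ho, h0.1, h'.1], fun st hst => ?_⟩
        cases st with
        | nil => exact absurd h0.1 (by simp at hst; omega)
        | cons s t =>
          have := h'.2 t (by simp at hst; omega)
          simpa [pvSt, List.foldl_cons, pvStep, ho] using this
      · have h' := ih n (by simpa [pvh, ho, hc] using h)
        refine ⟨by simpa [pvh, ho, hc] using h'.1, fun st hst => ?_⟩
        have := h'.2 st hst
        simpa [pvSt, List.foldl_cons, pvStep, ho, hc] using this

-- the crux: on a prefix-valid pair list, B's right-to-left pass keeps exactly the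
-- entries whose index is not among the bottom (|stack| - m) surviving stack entries
theorem pv_crux (oL cL : List Char) (Q : List (Nat × Char)) :
    ∀ m : Nat, List.Pairwise (fun p q => p.1 < q.1) Q →
      pvh oL cL Q 0 = true →
      m ≤ (pvSt oL cL Q []).length →
      (pvB_pass2 oL cL ((Q.map Prod.snd).reverse) m).reverse
        = (Q.filter (fun p => !decide (p.1 ∈ List.drop m (pvSt oL cL Q [])))).map Prod.snd := by
  induction Q using List.reverseRecOn with
  | nil => intro m _ _ _; simp [pvB_pass2, pvSt]
  | append_singleton W e ihW =>
    intro m hpw hpv hm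
    obtain ⟨i, c⟩ := e
    have hpwW : List.Pairwise (fun p q => p.1 < q.1) W := (List.pairwise_append.mp hpw).1
    have hlt : ∀ p ∈ W, p.1 < i := by
      intro p hp
      exact (List.pairwise_append.mp hpw).2.2 p hp (i, c) (by simp)
    have hS : ∀ x ∈ pvSt oL cL W [], x < i := by
      intro x hx
      rcases pvSt_mem oL cL W [] x hx with h | h
      · simp at h
      · rcases List.mem_map.mp h with ⟨p, hp, hpx⟩
        exact hpx ▸ hlt p hp
    have hSfull : pvSt oL cL (W ++ [(i, c)]) [] = pvStep oL cL (pvSt oL cL W []) (i, c) := by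
      simp [pvSt, List.foldl_append]
    have hpvW := (pvh_append_elim oL cL W [(i, c)] 0 hpv).1
    have hrev : ((W ++ [(i, c)]).map Prod.snd).reverse = c :: (W.map Prod.snd).reverse := by simp
    by_cases ho : oL = [c]
    · subst ho
      have hS' : pvSt [c] cL (W ++ [(i, c)]) [] = i :: pvSt [c] cL W [] := by
        rw [hSfull]; simp [pvStep]
      rcases Nat.eq_zero_or_pos m with hm0 | hmpos
      · subst hm0
        have hstep : pvB_pass2 [c] cL (c :: (W.map Prod.snd).reverse) 0
            = pvB_pass2 [c] cL ((W.map Prod.snd).reverse) 0 := by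
          simp [pvB_pass2]
        rw [hrev, hS', hstep]
        rw [ihW 0 hpwW hpvW (Nat.zero_le _)]
        rw [List.filter_append, List.drop_zero, List.drop_zero]
        have he : (List.filter (fun p => !decide (p.1 ∈ i :: pvSt [c] cL W [])) [(i, c)]) = [] := by
          simp
        have hW : List.filter (fun p => !decide (p.1 ∈ i :: pvSt [c] cL W [])) W
            = List.filter (fun p => !decide (p.1 ∈ pvSt [c] cL W [])) W := by
          apply List.filter_congr
          intro p hp
          have hne : p.1 ≠ i := Nat.ne_of_lt (hlt p hp)
          simp [List.mem_cons, hne]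
        rw [he, hW]
        simp
      · obtain ⟨k, rfl⟩ : ∃ k, m = k + 1 := ⟨m - 1, by omega⟩
        rw [hS'] at hm
        have hk : k ≤ (pvSt [c] cL W []).length := by simpa using hm
        have hstep : pvB_pass2 [c] cL (c :: (W.map Prod.snd).reverse) (k + 1)
            = c :: pvB_pass2 [c] cL ((W.map Prod.snd).reverse) k := by
          simp [pvB_pass2]
        rw [hrev, hS', hstep]
        rw [List.reverse_cons, ihW k hpwW hpvW hk]
        rw [List.drop_succ_cons, List.filter_append]
        have hni : i ∉ List.drop k (pvSt [c] cL W []) := by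
          intro hmemi
          exact absurd (hS i (List.mem_of_mem_drop hmemi)) (by omega)
        have he : (List.filter (fun p => !decide (p.1 ∈ List.drop k (pvSt [c] cL W []))) [(i, c)]) = [(i, c)] := by
          simp [hni]
        rw [he]
        simp
    · by_cases hc : cL = [c]
      · subst hc
        have hne : 0 < (pvSt oL [c] W []).length := by
          have h2 := (pvh_append_elim oL [c] W [(i, c)] 0 hpv).2 [] rfl
          simpa [pvh, ho] using h2
        obtain ⟨s, t, hst⟩ : ∃ s t, pvSt oL [c] W [] = s :: t := by
          cases hE : pvSt oL [c] W [] with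
          | nil => rw [hE] at hne; simp at hne
          | cons s t => exact ⟨s, t, rfl⟩
        have hS' : pvSt oL [c] (W ++ [(i, c)]) [] = t := by
          rw [hSfull, hst]; simp [pvStep, ho]
        rw [hS'] at hm
        have hm1 : m + 1 ≤ (pvSt oL [c] W []).length := by rw [hst]; simpa using Nat.succ_le_succ hm
        have hstep : pvB_pass2 oL [c] (c :: (W.map Prod.snd).reverse) m
            = c :: pvB_pass2 oL [c] ((W.map Prod.snd).reverse) (m + 1) := by
          simp [pvB_pass2, ho]
        rw [hrev, hS', hstep]
        rw [List.reverse_cons, ihW (m + 1) hpwW hpvW hm1]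
        rw [hst, List.drop_succ_cons, List.filter_append]
        have hni : i ∉ List.drop m t := by
          intro hmemi
          have hmem' : i ∈ pvSt oL [c] W [] := by
            rw [hst]; exact List.mem_cons_of_mem s (List.mem_of_mem_drop hmemi)
          exact absurd (hS i hmem') (by omega)
        have he : (List.filter (fun p => !decide (p.1 ∈ List.drop m t)) [(i, c)]) = [(i, c)] := by
          simp [hni]
        rw [he]
        simp
      · have hS' : pvSt oL cL (W ++ [(i, c)]) [] = pvSt oL cL W [] := by
          rw [hSfull]; simp [pvStep, ho, hc]
        rw [hS'] at hm
        have hstep : pvB_pass2 oL cL (c :: (W.map Prod.snd).reverse) m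
            = c :: pvB_pass2 oL cL ((W.map Prod.snd).reverse) m := by
          simp [pvB_pass2, ho, hc]
        rw [hrev, hS', hstep]
        rw [List.reverse_cons, ihW m hpwW hpvW hm]
        rw [List.filter_append]
        have hni : i ∉ List.drop m (pvSt oL cL W []) := by
          intro hmemi
          exact absurd (hS i (List.mem_of_mem_drop hmemi)) (by omega)
        have he : (List.filter (fun p => !decide (p.1 ∈ List.drop m (pvSt oL cL W []))) [(i, c)]) = [(i, c)] := by
          simp [hni]
        rw [he]
        simp

-- the main equivalence, at the level of character lists
theorem pv_main (oL cL : List Char) (cs : List Char) :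
    (pvEnumFrom 0 cs).filterMap
        (fun p => if PySem.Set.contains
            ((pvA_scan oL cL (pvEnumFrom 0 cs) [] (PySem.Set.ofList [])).1.foldl
              (fun s i => PySem.Set.add s i)
              (pvA_scan oL cL (pvEnumFrom 0 cs) [] (PySem.Set.ofList [])).2) p.1
          then none else some p.2)
      = (pvB_pass2 oL cL ((pvB_pass1 oL cL cs 0).reverse) 0).reverse := by
  have hof : (PySem.Set.ofList [] : PySem.Set Nat) = [] := rfl
  rw [pvA_scan_split oL cL (pvEnumFrom 0 cs) [] (PySem.Set.ofList [])]
  rw [pvFilterMap_eq_filter_map]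
  simp only [List.length_nil, hof]
  have hrem0 : ∀ x ∈ ([] : PySem.Set Nat), x < 0 := by
    intro x hx; simp at hx
  have hcdec : ∀ (s : PySem.Set Nat) (x : Nat), PySem.Set.contains s x = decide (x ∈ s) := by
    intro s x
    rcases h : decide (x ∈ s) with _ | _
    · rw [Bool.eq_false_iff]
      intro hcon
      exact absurd ((PySem.Set.contains_iff s x).mp hcon) (by simpa using h)
    · exact (PySem.Set.contains_iff s x).mpr (by simpa using h)
  have hpred : ∀ p ∈ pvEnumFrom 0 cs,
      (!(PySem.Set.contains
          ((pvSt oL cL (pvEnumFrom 0 cs) []).foldl (fun s i => PySem.Set.add s i)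
            (pvRem oL cL (pvEnumFrom 0 cs) 0 ([] : PySem.Set Nat))) p.1))
        = (!decide (p.1 ∈ pvRem oL cL (pvEnumFrom 0 cs) 0 ([] : PySem.Set Nat))
            && !decide (p.1 ∈ pvSt oL cL (pvEnumFrom 0 cs) [])) := by
    intro p _
    rw [hcdec]
    have hm := PySem.Set.mem_foldl_add (f := fun (b : Nat) => b)
      (l := pvSt oL cL (pvEnumFrom 0 cs) [])
      (s := pvRem oL cL (pvEnumFrom 0 cs) 0 ([] : PySem.Set Nat))
      (y := p.1)
    simp only [hm]
    simp
  rw [List.filter_congr hpred]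
  have hsplit2 : (pvEnumFrom 0 cs).filter
        (fun p => !decide (p.1 ∈ pvRem oL cL (pvEnumFrom 0 cs) 0 ([] : PySem.Set Nat))
            && !decide (p.1 ∈ pvSt oL cL (pvEnumFrom 0 cs) []))
      = ((pvEnumFrom 0 cs).filter
          (fun p => !decide (p.1 ∈ pvRem oL cL (pvEnumFrom 0 cs) 0 ([] : PySem.Set Nat)))).filter
          (fun p => !decide (p.1 ∈ pvSt oL cL (pvEnumFrom 0 cs) [])) := by
    rw [List.filter_filter]
    apply List.filter_congr
    intro p _
    rw [Bool.and_comm]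
  rw [hsplit2]
  have hQsnd := pv_pass1_eq oL cL cs 0 0 ([] : PySem.Set Nat) hrem0
  have hQpv := pv_filtered_valid oL cL cs 0 0 ([] : PySem.Set Nat) hrem0
  have hQpw : List.Pairwise (fun (p q : Nat × Char) => p.1 < q.1)
      ((pvEnumFrom 0 cs).filter
        (fun p => !decide (p.1 ∈ pvRem oL cL (pvEnumFrom 0 cs) 0 ([] : PySem.Set Nat)))) :=
    (pvEnumFrom_pairwise 0 cs).sublist List.filter_sublist
  have hQst : pvSt oL cL ((pvEnumFrom 0 cs).filter
        (fun p => !decide (p.1 ∈ pvRem oL cL (pvEnumFrom 0 cs) 0 ([] : PySem.Set Nat)))) []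
      = pvSt oL cL (pvEnumFrom 0 cs) [] :=
    pv_transfer oL cL cs 0 [] ([] : PySem.Set Nat) hrem0
  have hcrux := pv_crux oL cL
      ((pvEnumFrom 0 cs).filter
        (fun p => !decide (p.1 ∈ pvRem oL cL (pvEnumFrom 0 cs) 0 ([] : PySem.Set Nat))))
      0 hQpw hQpv (Nat.zero_le _)
  rw [List.drop_zero, hQst, hQsnd] at hcrux
  exact hcrux.symm

-- ===== VERDICT (by name: the statement is the Claim_ definition above) =====
theorem remove_unbalanced_py_spec : Claim_equal_remove_unbalanced_py := by
  intro text open_char close_char _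
  unfold Spec_remove_unbalanced_py remove_unbalanced_py remove_unbalanced_py_alt
  exact congrArg String.mk (pv_main open_char.toList close_char.toList text.toList)
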